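-- pv_equiv track=rewrite | github.com/juanpardo123/100DaysOfPython | Day3/Exercise5LoveCalculator.py | trueLove
-- ===== SOURCE A (Python) =====
-- def trueLove(qName1, qName2):
--     combine = qName1 + qName2
--     counterTrue = 0
--     counterLove = 0
--     for letter in combine:
--         if (letter.lower() == 't'):
--             counterTrue+=1
--         elif (letter.lower() == 'r'):
--             counterTrue+=1
--         elif (letter.lower() == 'u'):
--             counterTrue+=1
--         elif (letter.lower() == 'e'):
--             counterTrue+=1
--         if (letter.lower() == 'l'):
--             counterLove+=1
--         if (letter.lower() == 'o'):
--             counterLove+=1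
--         if (letter.lower() == 'v'):
--             counterLove+=1
--         if (letter.lower() == 'e'):
--             counterLove+=1
--     counterTrueLove =int(f"{counterTrue}{counterLove}")
--     if (counterTrueLove < 10 or counterTrueLove > 90):
--         return f"Your score is {counterTrueLove}, you go together like coke and mentos."
--     if (counterTrueLove > 40 and counterTrueLove < 50):
--         return f"Your score is {counterTrueLove}, you are alright together."
--     else:
--         return f"Your score is {counterTrueLove}."
-- ===== SOURCE B (Python) =====
-- def trueLove(qName1, qName2):
--     combined = (qName1 + qName2).lower()
--     counterTrue = sum(combined.count(c) for c in "true")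
--     counterLove = sum(combined.count(c) for c in "love")
--     score = int(str(counterTrue) + str(counterLove))
--     if score < 10 or score > 90:
--         return f"Your score is {score}, you go together like coke and mentos."
--     if 40 < score < 50:
--         return f"Your score is {score}, you are alright together."
--     return f"Your score is {score}."
-- ===== Notes on version B (the rewrite author's own statement) =====
-- stated objective: simpler
-- what changed: Lowercases the combined string once and replaces A's per-character if/elif cascade with staged whole-string scans: one built-in str.count per target letter, summed per word; no per-character branching loop remains.
import Mathlib
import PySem

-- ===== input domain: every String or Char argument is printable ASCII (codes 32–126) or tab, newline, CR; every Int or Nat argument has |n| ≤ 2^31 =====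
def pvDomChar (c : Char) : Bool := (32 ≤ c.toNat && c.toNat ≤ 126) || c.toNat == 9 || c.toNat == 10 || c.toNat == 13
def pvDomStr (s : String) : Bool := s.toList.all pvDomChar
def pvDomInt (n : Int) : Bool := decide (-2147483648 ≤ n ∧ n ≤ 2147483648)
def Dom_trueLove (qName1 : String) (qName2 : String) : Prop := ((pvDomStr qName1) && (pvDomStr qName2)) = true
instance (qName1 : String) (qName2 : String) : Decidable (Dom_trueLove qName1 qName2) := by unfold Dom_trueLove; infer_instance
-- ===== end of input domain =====

-- B lowercases the combined string once and replaces A's per-character if/elif cascade by staged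
-- whole-string scans (one str.count per target letter, summed per word); simpler, same return value.

-- ===== PORT A =====
-- letter.lower() on a single character is ported as PySem.Chars.lowerChar (exact on ASCII)
def trueLoveStep (st : Int × Int) (letter : Char) : Int × Int :=
  let lc := PySem.Chars.lowerChar letter
  let ct := if lc == 't' then st.1 + 1
            else if lc == 'r' then st.1 + 1
            else if lc == 'u' then st.1 + 1
            else if lc == 'e' then st.1 + 1
            else st.1
  let cl := st.2
  let cl := if lc == 'l' then cl + 1 else cl
  let cl := if lc == 'o' then cl + 1 else cl
  let cl := if lc == 'v' then cl + 1 else cl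
  let cl := if lc == 'e' then cl + 1 else cl
  (ct, cl)

-- int(f"{t}{l}") never fails (both pieces are decimal digit strings), so .getD 0 is exact
def trueLove (qName1 : String) (qName2 : String) : String :=
  let combine := qName1 ++ qName2
  let st := combine.toList.foldl trueLoveStep (0, 0)
  let n := (PySem.Int.ofStr? (PySem.Int.toStr st.1 ++ PySem.Int.toStr st.2)).getD 0
  if n < 10 || n > 90 then
    "Your score is " ++ PySem.Int.toStr n ++ ", you go together like coke and mentos."
  else if 40 < n && n < 50 then
    "Your score is " ++ PySem.Int.toStr n ++ ", you are alright together."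
  else
    "Your score is " ++ PySem.Int.toStr n ++ "."

-- ===== PORT B =====
-- combined.count(c) for a one-character c is PySem.Str.count combined (String.ofList [c]) (exact)
def trueLove_alt (qName1 : String) (qName2 : String) : String :=
  let combined := PySem.Str.lower (qName1 ++ qName2)
  let counterTrue : Int :=
    ("true".toList.map (fun c => (PySem.Str.count combined (String.ofList [c]) : Int))).sum
  let counterLove : Int :=
    ("love".toList.map (fun c => (PySem.Str.count combined (String.ofList [c]) : Int))).sum
  let score := (PySem.Int.ofStr? (PySem.Int.toStr counterTrue ++ PySem.Int.toStr counterLove)).getD 0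
  if score < 10 || score > 90 then
    "Your score is " ++ PySem.Int.toStr score ++ ", you go together like coke and mentos."
  else if 40 < score && score < 50 then
    "Your score is " ++ PySem.Int.toStr score ++ ", you are alright together."
  else
    "Your score is " ++ PySem.Int.toStr score ++ "."

-- ===== PRECONDITION & SPEC =====
def Spec_trueLove (qName1 : String) (qName2 : String) (out : String) : Prop := out = trueLove_alt qName1 qName2
instance (qName1 : String) (qName2 : String) (out : String) : Decidable (Spec_trueLove qName1 qName2 out) := by unfold Spec_trueLove; infer_instance

-- ===== CLAIM (what is proved, stated in full; the proofs are below) =====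
def Claim_equal_trueLove : Prop := ∀ (qName1 : String) (qName2 : String), Dom_trueLove qName1 qName2 → Spec_trueLove qName1 qName2 (trueLove qName1 qName2)

-- ===== LEMMAS AND PROOFS =====

lemma foldl_trueLoveStep (cs : List Char) (a b : Int) :
    cs.foldl trueLoveStep (a, b) =
    (a + ((cs.map PySem.Chars.lowerChar).count 't' + (cs.map PySem.Chars.lowerChar).count 'r'
        + (cs.map PySem.Chars.lowerChar).count 'u' + (cs.map PySem.Chars.lowerChar).count 'e' : Int),
     b + ((cs.map PySem.Chars.lowerChar).count 'l' + (cs.map PySem.Chars.lowerChar).count 'o'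
        + (cs.map PySem.Chars.lowerChar).count 'v' + (cs.map PySem.Chars.lowerChar).count 'e' : Int)) := by
  induction cs generalizing a b with
  | nil => simp
  | cons c cs ih =>
    simp only [List.foldl_cons, List.map_cons, List.count_cons, trueLoveStep]
    rw [ih]
    by_cases h1 : PySem.Chars.lowerChar c = 't' <;>
    by_cases h2 : PySem.Chars.lowerChar c = 'r' <;>
    by_cases h3 : PySem.Chars.lowerChar c = 'u' <;>
    by_cases h4 : PySem.Chars.lowerChar c = 'e' <;>
    by_cases h5 : PySem.Chars.lowerChar c = 'l' <;>
    by_cases h6 : PySem.Chars.lowerChar c = 'o' <;>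
    by_cases h7 : PySem.Chars.lowerChar c = 'v' <;>
      simp_all <;> (try omega)

lemma count_go_singleton (c : Char) (fuel : Nat) :
    ∀ (l : List Char) (acc : Nat),
      PySem.Chars.count.go [c] fuel l acc = acc + (l.take fuel).count c := by
  induction fuel with
  | zero => intro l acc; cases l <;> simp [PySem.Chars.count.go]
  | succ n ih =>
    intro l acc
    cases l with
    | nil => simp [PySem.Chars.count.go]
    | cons h t =>
      simp only [PySem.Chars.count.go, List.isPrefixOf, List.take, List.count_cons]
      by_cases hc : h = c
      · subst hc
        simp [ih]
        omega
      · simp [hc, ih, Ne.symm hc]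

lemma chars_count_singleton (s : List Char) (c : Char) :
    PySem.Chars.count s [c] = s.count c := by
  simp [PySem.Chars.count, count_go_singleton]

lemma str_count_singleton (s : String) (c : Char) :
    PySem.Str.count s (String.ofList [c]) = s.toList.count c := by
  rw [PySem.Str.count_eq]
  simp [chars_count_singleton]

theorem trueLove_spec : Claim_equal_trueLove := by
  intro q1 q2 _
  unfold Spec_trueLove trueLove trueLove_alt
  simp only [foldl_trueLoveStep, str_count_singleton, PySem.Str.toList_lower, PySem.Chars.lower,
    show "true".toList = ['t','r','u','e'] from rfl,
    show "love".toList = ['l','o','v','e'] from rfl,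
    List.map_cons, List.map_nil, List.sum_cons, List.sum_nil]
  ring_nf
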